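-- pv_equiv track=rewrite | github.com/rodrigorahal/advent-of-code-2018 | 20/map.py | walk_group
-- ===== SOURCE A (Python) =====
-- DIRS = {
--     "N": (-1, 0),
--     "S": (1, 0),
--     "W": (0, -1),
--     "E": (0, 1),
-- }
--
-- def walk_group(grid, row, col, pattern, i):
--     stops = []
--     srow, scol = row, col
--
--     while i < len(pattern):
--         char = pattern[i]
--
--         if char == ")":
--             stops.append((row, col))
--             return stops, i + 1
--
--         elif char == "(":
--             nested_stops, j = walk_group(grid, row, col, pattern, i + 1)
--             stops.extend(nested_stops)
--             i = j
--
--         elif char == "|":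
--             stops.append((row, col))
--             row, col = srow, scol
--             i += 1
--
--         else:
--             row, col = mark(grid, row, col, char)
--             i += 1
--     return stops, i
--
-- def mark(grid, row, col, dir):
--     dr, dc = DIRS[dir]
--     nrow, ncol = row + dr, col + dc
--     grid[nrow, ncol] = "-" if dr else "|"
--     row, col = nrow, ncol
--     nrow, ncol = row + dr, col + dc
--     grid[nrow, ncol] = "."
--     row, col = nrow, ncol
--     return row, col
-- ===== SOURCE B (Python) =====
-- def _advance(grid, row, col, char):
--     # move two cells in the given direction, marking the door and the room
--     if char == "N":
--         dr, dc = -1, 0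
--     elif char == "S":
--         dr, dc = 1, 0
--     elif char == "W":
--         dr, dc = 0, -1
--     elif char == "E":
--         dr, dc = 0, 1
--     grid[row + dr, col + dc] = "-" if dr else "|"
--     grid[row + 2 * dr, col + 2 * dc] = "."
--     return row + 2 * dr, col + 2 * dc
--
--
-- def walk_group(grid, row, col, pattern, i):
--     # Iterative single scan: an explicit stack of saved branch-start positions
--     # replaces A's recursion; the starting position is a bottom sentinel.
--     stops = []
--     stack = [(row, col)]
--     k = i
--     n = len(pattern)
--     while k < n:
--         char = pattern[k]
--         if char == "(":
--             stack.append((row, col))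
--         elif char == "|":
--             stops.append((row, col))
--             row, col = stack[-1]
--         elif char == ")":
--             stops.append((row, col))
--             if len(stack) == 1:
--                 return stops, k + 1
--             row, col = stack.pop()
--         else:
--             row, col = _advance(grid, row, col, char)
--         k += 1
--     return stops, k
-- ===== Notes on version B (the rewrite author's own statement) =====
-- stated objective: alternative
-- what changed: A's recursive call per '(' is replaced by one iterative scan of the remaining suffix that keeps an explicit stack of saved branch-start positions (the start position as bottom sentinel) — '(' pushes, '|' resets to the stack top, ')' appends and pops or returns at the sentinel — and the DIRS dict lookup is replaced by an if/elif delta step.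
-- outside the precondition, e.g. on walk_group({}, 0, 0, ')', -1): A returns ([(0, 0)], 0), B returns ([(0, 0)], 0)
import Mathlib
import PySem

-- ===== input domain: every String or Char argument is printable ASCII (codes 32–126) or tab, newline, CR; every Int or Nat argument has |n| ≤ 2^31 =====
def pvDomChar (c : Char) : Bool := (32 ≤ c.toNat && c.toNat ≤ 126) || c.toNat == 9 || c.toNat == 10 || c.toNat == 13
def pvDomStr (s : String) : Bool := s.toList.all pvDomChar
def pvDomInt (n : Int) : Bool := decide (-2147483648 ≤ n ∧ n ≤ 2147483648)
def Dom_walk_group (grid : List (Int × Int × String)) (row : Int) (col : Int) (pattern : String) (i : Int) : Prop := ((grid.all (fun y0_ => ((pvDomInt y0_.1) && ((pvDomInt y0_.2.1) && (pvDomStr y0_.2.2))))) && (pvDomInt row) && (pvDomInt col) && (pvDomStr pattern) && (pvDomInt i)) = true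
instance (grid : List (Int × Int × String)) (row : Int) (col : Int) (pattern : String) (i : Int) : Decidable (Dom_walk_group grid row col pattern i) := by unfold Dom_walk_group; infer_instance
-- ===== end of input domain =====

-- B replaces A's recursion-per-'(' by one iterative scan of the remaining suffix with an
-- explicit stack of saved branch-start positions (start position as bottom sentinel) and an
-- if/elif delta step instead of the DIRS dict: same values, different decomposition.
-- A's helper `mark` also writes two cells into the grid dict; that mutation is never read
-- back and the equivalence proved here is about the return value only (B performs the
-- identical mutations in Python).

-- ===== PORT A =====
-- DIRS, keyed by the single character of pattern[i]
def pvDirs : List (Char × (Int × Int)) := [('N', (-1, 0)), ('S', (1, 0)), ('W', (0, -1)), ('E', (0, 1))]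

-- mark(grid,row,col,dir): two steps in direction `dir`; the two grid writes are dict
-- mutations never read back, so the port returns the new position (none = KeyError).
def markA (row col : Int) (c : Char) : Option (Int × Int) :=
  match pvDirs.lookup c with
  | none => none
  | some (dr, dc) => some (row + dr + dr, col + dc + dc)

-- the while-loop of A, with the recursive call for '('; fuel only makes the same
-- computation total (it never runs out on inputs admitted by Pre_walk_group);
-- the `none` results stand at points where the Python raises (outside Pre_).
def walkA : Nat → List Char → Int → Int → Int → Int → List (Int × Int) → Int → List (Int × Int) × Int
  | 0, _, _, _, _, _, stops, i => (stops, i)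
  | fuel + 1, pat, row, col, srow, scol, stops, i =>
    if i < (pat.length : Int) then
      match PySem.List.pyGet? pat i with
      | none => (stops, i)                                   -- IndexError (i < -len): outside Pre_
      | some c =>
        if c = ')' then (stops ++ [(row, col)], i + 1)
        else if c = '(' then
          let r := walkA fuel pat row col row col [] (i + 1)
          walkA fuel pat row col srow scol (stops ++ r.1) r.2
        else if c = '|' then
          walkA fuel pat srow scol srow scol (stops ++ [(row, col)]) (i + 1)
        else
          match markA row col c with
          | none => (stops, i)                               -- KeyError in mark: outside Pre_
          | some rc => walkA fuel pat rc.1 rc.2 srow scol stops (i + 1)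
    else (stops, i)

def walk_group (grid : List (Int × Int × String)) (row : Int) (col : Int) (pattern : String) (i : Int) : (List (Int × Int)) × Int :=
  walkA (pattern.toList.length + 1) pattern.toList row col row col [] i

-- ===== PORT B =====
-- _advance as an if/elif chain on the direction character; the two grid writes are never
-- read back, so the port returns the new position (none = the Python's error on a
-- non-direction character, outside Pre_).
def stepB (row col : Int) (c : Char) : Option (Int × Int) :=
  if c = 'N' then some (row - 2, col)
  else if c = 'S' then some (row + 2, col)
  else if c = 'W' then some (row, col - 2)
  else if c = 'E' then some (row, col + 2)
  else none

-- B's single while-loop, transcribed as structural recursion over the remaining suffix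
-- pattern[k:] with the running index k carried for the returned position; the stack head
-- is the top, the bottom element is the sentinel.
def walkBgo : List Char → Int → Int → Int → List (Int × Int) → List (Int × Int) → List (Int × Int) × Int
  | [], k, _, _, _, stops => (stops, k)
  | c :: rest, k, row, col, stack, stops =>
    if c = '(' then walkBgo rest (k + 1) row col ((row, col) :: stack) stops
    else if c = '|' then
      match stack with
      | [] => (stops, k)                                     -- unreachable: the sentinel is never popped
      | (r, cc) :: tail => walkBgo rest (k + 1) r cc ((r, cc) :: tail) (stops ++ [(row, col)])
    else if c = ')' then
      match stack with
      | [] => (stops, k)                                     -- unreachable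
      | [_] => (stops ++ [(row, col)], k + 1)
      | (r, cc) :: tail => walkBgo rest (k + 1) r cc tail (stops ++ [(row, col)])
    else
      match stepB row col c with
      | none => (stops, k)                                   -- error in _advance: outside Pre_
      | some rc => walkBgo rest (k + 1) rc.1 rc.2 stack stops

def walk_group_alt (grid : List (Int × Int × String)) (row : Int) (col : Int) (pattern : String) (i : Int) : (List (Int × Int)) × Int :=
  walkBgo (pattern.toList.drop i.toNat) i row col [(row, col)] []

-- ===== PRECONDITION & SPEC =====
-- fstat seq k: scan `seq` with k enclosing groups still open: some true = the walk ends
-- at a top-level ')', some false = the pattern runs out, none = an invalid character is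
-- read before that (Python raises KeyError, so such inputs lie outside Pre_).
def fstat : List Char → Nat → Option Bool
  | [], _ => some false
  | c :: r, d =>
    if c = ')' then (if d = 0 then some true else fstat r (d - 1))
    else if c = '(' then fstat r (d + 1)
    else if c = '|' then fstat r d
    else if (pvDirs.lookup c).isSome then fstat r d
    else none

-- Pre_ excludes (a) inputs where A raises (an invalid character, or index i < -len(pattern),
-- reached before the walk resolves) and (b) negative start indices i on which A reads
-- pattern[i] by Python's negative-index wraparound and may still return; B returns the
-- same values there too, the Lean claim simply does not cover that accidental regime.
def Pre_walk_group (grid : List (Int × Int × String)) (row : Int) (col : Int) (pattern : String) (i : Int) : Prop :=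
  0 ≤ i ∧ (fstat (pattern.toList.drop i.toNat) 0).isSome = true
instance (grid : List (Int × Int × String)) (row : Int) (col : Int) (pattern : String) (i : Int) : Decidable (Pre_walk_group grid row col pattern i) := by unfold Pre_walk_group; infer_instance

def pvWitness_walk_group : (List (Int × Int × String)) × Int × Int × String × Int := ([], 0, 0, "NN(EE|WW(S|N)E)S", 0)

def Spec_walk_group (grid : List (Int × Int × String)) (row : Int) (col : Int) (pattern : String) (i : Int) (out : (List (Int × Int)) × Int) : Prop := out = walk_group_alt grid row col pattern i
instance (grid : List (Int × Int × String)) (row : Int) (col : Int) (pattern : String) (i : Int) (out : (List (Int × Int)) × Int) : Decidable (Spec_walk_group grid row col pattern i out) := by unfold Spec_walk_group; infer_instance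

-- ===== CLAIM (what is proved, stated in full; the proofs are below) =====
def Claim_equal_walk_group : Prop := ∀ (grid : List (Int × Int × String)) (row : Int) (col : Int) (pattern : String) (i : Int), Dom_walk_group grid row col pattern i → Pre_walk_group grid row col pattern i → Spec_walk_group grid row col pattern i (walk_group grid row col pattern i)

-- ===== LEMMAS AND PROOFS =====

-- B's delta step computes exactly A's mark
theorem stepB_eq_markA (row col : Int) (c : Char) : stepB row col c = markA row col c := by
  by_cases h1 : c = 'N'
  · subst h1; simp [stepB, markA, pvDirs, List.lookup]; ring_nf
  · by_cases h2 : c = 'S'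
    · subst h2; simp [stepB, markA, pvDirs, List.lookup]; ring_nf
    · by_cases h3 : c = 'W'
      · subst h3; simp [stepB, markA, pvDirs, List.lookup]; ring_nf
      · by_cases h4 : c = 'E'
        · subst h4; simp [stepB, markA, pvDirs, List.lookup]; ring_nf
        · have e1 : (c == 'N') = false := by simpa using h1
          have e2 : (c == 'S') = false := by simpa using h2
          have e3 : (c == 'W') = false := by simpa using h3
          have e4 : (c == 'E') = false := by simpa using h4
          simp [stepB, markA, pvDirs, List.lookup, e1, e2, e3, e4, h1, h2, h3, h4]

-- indexing one step
theorem pv_drop_step (pat : List Char) (i : Int) (h0 : 0 ≤ i) (h1 : i < (pat.length : Int))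
    (hn : i.toNat < pat.length) :
    PySem.List.pyGet? pat i = some pat[i.toNat] ∧
    pat.drop i.toNat = pat[i.toNat] :: pat.drop ((i + 1).toNat) := by
  constructor
  · rw [PySem.List.pyGet?_of_nonneg pat h0, List.getElem?_eq_getElem hn]
  · have h2 : (i + 1).toNat = i.toNat + 1 := by omega
    rw [h2, List.drop_eq_getElem_cons hn]

-- A's loop does nothing past the end of the pattern
theorem walkA_stop (f : Nat) (pat : List Char) (r c sr sc : Int) (st : List (Int × Int)) (i : Int)
    (h : ¬ i < (pat.length : Int)) : walkA f pat r c sr sc st i = (st, i) := by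
  cases f with
  | zero => rfl
  | succ f => simp [walkA, h]

-- the returned index never decreases
theorem walkA_snd_ge (f : Nat) (pat : List Char) (r c sr sc : Int) (st : List (Int × Int)) (i : Int) :
    i ≤ (walkA f pat r c sr sc st i).2 := by
  induction f generalizing r c sr sc st i with
  | zero => simp [walkA]
  | succ f ih =>
    simp only [walkA]
    split
    · cases hg : PySem.List.pyGet? pat i with
      | none => simp
      | some ch =>
        simp only
        split
        · simp
        · split
          · have h1 := ih r c r c [] (i + 1)
            have h2 := ih r c sr sc (st ++ (walkA f pat r c r c [] (i + 1)).1)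
              ((walkA f pat r c r c [] (i + 1)).2)
            exact le_trans (by omega) h2
          · split
            · have := ih sr sc sr sc (st ++ [(r, c)]) (i + 1); omega
            · cases hm : markA r c ch with
              | none => simp
              | some rc =>
                simp only
                have := ih rc.1 rc.2 sr sc st (i + 1); omega
    · simp

-- the accumulated stops factor out
theorem walkA_stops (f : Nat) (pat : List Char) (r c sr sc : Int) (st : List (Int × Int)) (i : Int) :
    walkA f pat r c sr sc st i
      = (st ++ (walkA f pat r c sr sc [] i).1, (walkA f pat r c sr sc [] i).2) := by
  induction f generalizing r c sr sc st i with
  | zero => simp [walkA]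
  | succ f ih =>
    simp only [walkA]
    split
    · cases hg : PySem.List.pyGet? pat i with
      | none => simp
      | some ch =>
        simp only
        split
        · simp
        · split
          · rw [ih r c sr sc (st ++ (walkA f pat r c r c [] (i + 1)).1) ((walkA f pat r c r c [] (i + 1)).2),
                ih r c sr sc ([] ++ (walkA f pat r c r c [] (i + 1)).1) ((walkA f pat r c r c [] (i + 1)).2)]
            simp
          · split
            · rw [ih sr sc sr sc (st ++ [(r, c)]) (i + 1), ih sr sc sr sc ([] ++ [(r, c)]) (i + 1)]
              simp
            · cases hm : markA r c ch with
              | none => simp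
              | some rc =>
                simp only
                rw [ih rc.1 rc.2 sr sc st (i + 1)]
    · simp

-- fuel irrelevance once the fuel exceeds the number of remaining characters
theorem walkA_fuel (f g : Nat) (pat : List Char) (r c sr sc : Int) (st : List (Int × Int)) (i : Int)
    (hf : (pat.length : Int) < f + i) (hg : (pat.length : Int) < g + i) :
    walkA f pat r c sr sc st i = walkA g pat r c sr sc st i := by
  induction f generalizing g r c sr sc st i with
  | zero =>
    rw [walkA_stop 0 pat r c sr sc st i (by omega), walkA_stop g pat r c sr sc st i (by omega)]
  | succ f ih =>
    cases g with
    | zero =>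
      rw [walkA_stop (f + 1) pat r c sr sc st i (by omega), walkA_stop 0 pat r c sr sc st i (by omega)]
    | succ g =>
      by_cases hlt : i < (pat.length : Int)
      · simp only [walkA, if_pos hlt]
        cases hg : PySem.List.pyGet? pat i with
        | none => rfl
        | some ch =>
          simp only
          split
          · rfl
          · split
            · have e1 : walkA f pat r c r c [] (i + 1) = walkA g pat r c r c [] (i + 1) :=
                ih g r c r c [] (i + 1) (by omega) (by omega)
              rw [e1]
              have hge := walkA_snd_ge g pat r c r c [] (i + 1)
              exact ih g r c sr sc _ _ (by omega) (by omega)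
            · split
              · exact ih g sr sc sr sc _ _ (by omega) (by omega)
              · cases hm : markA r c ch with
                | none => rfl
                | some rc => exact ih g rc.1 rc.2 sr sc st (i + 1) (by omega) (by omega)
      · rw [walkA_stop (f + 1) pat r c sr sc st i hlt, walkA_stop (g + 1) pat r c sr sc st i hlt]

-- an exhausting scan exhausts at every depth
theorem fstat_false_mono (seq : List Char) (d d' : Nat) (h : d ≤ d')
    (hs : fstat seq d = some false) : fstat seq d' = some false := by
  induction seq generalizing d d' with
  | nil => simp [fstat]
  | cons ch r ihr =>
    simp only [fstat] at hs ⊢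
    split_ifs at hs ⊢ with h1 h2 h3 <;>
      first
        | (exact ihr _ _ (by omega) hs)
        | omega
        | simp_all

-- a scan that is valid at a larger depth is valid at a smaller one
theorem fstat_isSome_anti (seq : List Char) (d d' : Nat) (h : d ≤ d')
    (hs : (fstat seq d').isSome = true) : (fstat seq d).isSome = true := by
  induction seq generalizing d d' with
  | nil => simp [fstat]
  | cons ch r ihr =>
    simp only [fstat] at hs ⊢
    split_ifs at hs ⊢ with h1 h2 h3 <;>
      first
        | (exact ihr _ _ (by omega) hs)
        | omega
        | simp_all

-- a frame whose scan closes: its end index and the status of the remaining pattern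
theorem frame_closes (n : Nat) (pat : List Char) (i row col srow scol : Int)
    (h0 : 0 ≤ i) (hn : ((pat.length : Int) - i).toNat < n)
    (hs : fstat (pat.drop i.toNat) 0 = some true) :
    i + 1 ≤ (walkA (pat.length + 1) pat row col srow scol [] i).2 ∧
    (walkA (pat.length + 1) pat row col srow scol [] i).2 ≤ (pat.length : Int) ∧
    ∀ d, fstat (pat.drop ((walkA (pat.length + 1) pat row col srow scol [] i).2.toNat)) d
          = fstat (pat.drop i.toNat) (d + 1) := by
  induction n generalizing i row col srow scol with
  | zero => omega
  | succ n ih =>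
    by_cases hlt : i < (pat.length : Int)
    · have hn' : i.toNat < pat.length := by omega
      obtain ⟨hget, hdrop⟩ := pv_drop_step pat i h0 hlt hn'
      generalize hch : pat[i.toNat] = ch at hget hdrop
      rw [hdrop] at hs
      by_cases hc1 : ch = ')'
      · subst hc1
        have hW : walkA (pat.length + 1) pat row col srow scol [] i = ([(row, col)], i + 1) := by
          simp [walkA, if_pos hlt, hget]
        rw [hW]
        refine ⟨le_refl _, by push_cast; omega, ?_⟩
        intro d
        rw [hdrop]
        simp [fstat]
      · by_cases hc2 : ch = '('
        · subst hc2
          simp [fstat] at hs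
          have hiS : (fstat (pat.drop ((i + 1).toNat)) 0).isSome = true := by
            apply fstat_isSome_anti _ 0 1 (by omega)
            rw [hs]; rfl
          cases hb : fstat (pat.drop ((i + 1).toNat)) 0 with
          | none => rw [hb] at hiS; simp at hiS
          | some b =>
            cases b with
            | false =>
              have := fstat_false_mono (pat.drop ((i + 1).toNat)) 0 1 (by omega) hb
              rw [this] at hs; simp at hs
            | true =>
              have IH1 := ih (i + 1) row col row col (by omega) (by omega) hb
              have ef : walkA pat.length pat row col row col [] (i + 1)
                  = walkA (pat.length + 1) pat row col row col [] (i + 1) :=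
                walkA_fuel _ _ pat row col row col [] (i + 1) (by omega) (by omega)
              obtain ⟨hj1, hj1len, hshift1⟩ := IH1
              have hW : walkA (pat.length + 1) pat row col srow scol [] i
                  = walkA pat.length pat row col srow scol
                      ([] ++ (walkA pat.length pat row col row col [] (i + 1)).1)
                      ((walkA pat.length pat row col row col [] (i + 1)).2) := by
                simp [walkA, if_pos hlt, hget]
              rw [hW, ef]
              set r1 := walkA (pat.length + 1) pat row col row col [] (i + 1) with hr1
              have ec : walkA pat.length pat row col srow scol ([] ++ r1.1) r1.2
                  = walkA (pat.length + 1) pat row col srow scol ([] ++ r1.1) r1.2 :=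
                walkA_fuel _ _ pat row col srow scol _ r1.2 (by omega) (by omega)
              rw [ec, walkA_stops (pat.length + 1) pat row col srow scol ([] ++ r1.1) r1.2]
              have hs2 : fstat (pat.drop (r1.2.toNat)) 0 = some true := by
                rw [hshift1 0]; exact hs
              have IH2 := ih r1.2 row col srow scol (by omega) (by omega) hs2
              obtain ⟨hj2, hj2len, hshift2⟩ := IH2
              refine ⟨by simp; omega, by simp; omega, ?_⟩
              intro d
              simp only []
              rw [hshift2 d, hshift1 (d + 1), hdrop]
              simp [fstat]
        · by_cases hc3 : ch = '|'
          · subst hc3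
            simp [fstat] at hs
            have IH1 := ih (i + 1) srow scol srow scol (by omega) (by omega) hs
            have hW : walkA (pat.length + 1) pat row col srow scol [] i
                = walkA pat.length pat srow scol srow scol ([] ++ [(row, col)]) (i + 1) := by
              simp [walkA, if_pos hlt, hget]
            have ef : walkA pat.length pat srow scol srow scol ([] ++ [(row, col)]) (i + 1)
                = walkA (pat.length + 1) pat srow scol srow scol ([] ++ [(row, col)]) (i + 1) :=
              walkA_fuel _ _ pat srow scol srow scol _ (i + 1) (by omega) (by omega)
            rw [hW, ef, walkA_stops (pat.length + 1) pat srow scol srow scol ([] ++ [(row, col)]) (i + 1)]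
            obtain ⟨hj1, hj1len, hshift1⟩ := IH1
            refine ⟨by simp; omega, by simp; omega, ?_⟩
            intro d
            simp only []
            rw [hshift1 d, hdrop]
            simp [fstat]
          · simp only [fstat, if_neg hc1, if_neg hc2, if_neg hc3] at hs
            cases hl : pvDirs.lookup ch with
            | none => rw [hl] at hs; simp at hs
            | some p =>
              rw [hl] at hs
              simp only [Option.isSome_some, if_true] at hs
              have hmk : markA row col ch = some (row + p.1 + p.1, col + p.2 + p.2) := by
                simp [markA, hl]
              have IH1 := ih (i + 1) (row + p.1 + p.1) (col + p.2 + p.2) srow scol (by omega) (by omega) hs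
              have hW : walkA (pat.length + 1) pat row col srow scol [] i
                  = walkA pat.length pat (row + p.1 + p.1) (col + p.2 + p.2) srow scol [] (i + 1) := by
                simp [walkA, if_pos hlt, hget, if_neg hc1, if_neg hc2, if_neg hc3, hmk]
              have ef : walkA pat.length pat (row + p.1 + p.1) (col + p.2 + p.2) srow scol [] (i + 1)
                  = walkA (pat.length + 1) pat (row + p.1 + p.1) (col + p.2 + p.2) srow scol [] (i + 1) :=
                walkA_fuel _ _ pat _ _ srow scol [] (i + 1) (by omega) (by omega)
              rw [hW, ef]
              obtain ⟨hj1, hj1len, hshift1⟩ := IH1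
              refine ⟨by omega, by omega, ?_⟩
              intro d
              rw [hshift1 d, hdrop]
              simp [fstat, if_neg hc1, if_neg hc2, if_neg hc3, hl]
    · have hdn : pat.drop i.toNat = [] := List.drop_eq_nil_of_le (by omega)
      rw [hdn] at hs
      simp [fstat] at hs

-- a frame whose scan exhausts ends exactly at the end of the pattern
theorem frame_exhausts (n : Nat) (pat : List Char) (i row col srow scol : Int)
    (h0 : 0 ≤ i) (hle : i ≤ (pat.length : Int)) (hn : ((pat.length : Int) - i).toNat < n)
    (hs : fstat (pat.drop i.toNat) 0 = some false) :
    (walkA (pat.length + 1) pat row col srow scol [] i).2 = (pat.length : Int) := by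
  induction n generalizing i row col srow scol with
  | zero => omega
  | succ n ih =>
    by_cases hlt : i < (pat.length : Int)
    · have hn' : i.toNat < pat.length := by omega
      obtain ⟨hget, hdrop⟩ := pv_drop_step pat i h0 hlt hn'
      generalize hch : pat[i.toNat] = ch at hget hdrop
      rw [hdrop] at hs
      by_cases hc1 : ch = ')'
      · subst hc1; simp [fstat] at hs
      · by_cases hc2 : ch = '('
        · subst hc2
          simp [fstat] at hs
          have hiS : (fstat (pat.drop ((i + 1).toNat)) 0).isSome = true := by
            apply fstat_isSome_anti _ 0 1 (by omega)
            rw [hs]; rfl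
          have hW : walkA (pat.length + 1) pat row col srow scol [] i
              = walkA pat.length pat row col srow scol
                  ([] ++ (walkA pat.length pat row col row col [] (i + 1)).1)
                  ((walkA pat.length pat row col row col [] (i + 1)).2) := by
            simp [walkA, if_pos hlt, hget]
          have ef : walkA pat.length pat row col row col [] (i + 1)
              = walkA (pat.length + 1) pat row col row col [] (i + 1) :=
            walkA_fuel _ _ pat row col row col [] (i + 1) (by omega) (by omega)
          rw [hW, ef]
          cases hb : fstat (pat.drop ((i + 1).toNat)) 0 with
          | none => rw [hb] at hiS; simp at hiS
          | some b =>
            cases b with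
            | false =>
              have hj1 := ih (i + 1) row col row col (by omega) (by omega) (by omega) hb
              set r1 := walkA (pat.length + 1) pat row col row col [] (i + 1) with hr1
              have ec : walkA pat.length pat row col srow scol ([] ++ r1.1) r1.2
                  = walkA (pat.length + 1) pat row col srow scol ([] ++ r1.1) r1.2 :=
                walkA_fuel _ _ pat row col srow scol _ r1.2 (by omega) (by omega)
              rw [ec, walkA_stop (pat.length + 1) pat row col srow scol ([] ++ r1.1) r1.2 (by omega)]
              exact hj1
            | true =>
              have IH1 := frame_closes (((pat.length : Int) - (i + 1)).toNat + 1) pat (i + 1) row col row col (by omega) (by omega) hb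
              obtain ⟨hj1, hj1len, hshift1⟩ := IH1
              set r1 := walkA (pat.length + 1) pat row col row col [] (i + 1) with hr1
              have ec : walkA pat.length pat row col srow scol ([] ++ r1.1) r1.2
                  = walkA (pat.length + 1) pat row col srow scol ([] ++ r1.1) r1.2 :=
                walkA_fuel _ _ pat row col srow scol _ r1.2 (by omega) (by omega)
              rw [ec, walkA_stops (pat.length + 1) pat row col srow scol ([] ++ r1.1) r1.2]
              have hs2 : fstat (pat.drop (r1.2.toNat)) 0 = some false := by
                rw [hshift1 0]; exact hs
              exact ih r1.2 row col srow scol (by omega) (by omega) (by omega) hs2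
        · by_cases hc3 : ch = '|'
          · subst hc3
            simp [fstat] at hs
            have hW : walkA (pat.length + 1) pat row col srow scol [] i
                = walkA pat.length pat srow scol srow scol ([] ++ [(row, col)]) (i + 1) := by
              simp [walkA, if_pos hlt, hget]
            have ef : walkA pat.length pat srow scol srow scol ([] ++ [(row, col)]) (i + 1)
                = walkA (pat.length + 1) pat srow scol srow scol ([] ++ [(row, col)]) (i + 1) :=
              walkA_fuel _ _ pat srow scol srow scol _ (i + 1) (by omega) (by omega)
            rw [hW, ef, walkA_stops (pat.length + 1) pat srow scol srow scol ([] ++ [(row, col)]) (i + 1)]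
            exact ih (i + 1) srow scol srow scol (by omega) (by omega) (by omega) hs
          · simp only [fstat, if_neg hc1, if_neg hc2, if_neg hc3] at hs
            cases hl : pvDirs.lookup ch with
            | none => rw [hl] at hs; simp at hs
            | some p =>
              rw [hl] at hs
              simp only [Option.isSome_some, if_true] at hs
              have hmk : markA row col ch = some (row + p.1 + p.1, col + p.2 + p.2) := by
                simp [markA, hl]
              have hW : walkA (pat.length + 1) pat row col srow scol [] i
                  = walkA pat.length pat (row + p.1 + p.1) (col + p.2 + p.2) srow scol [] (i + 1) := by
                simp [walkA, if_pos hlt, hget, if_neg hc1, if_neg hc2, if_neg hc3, hmk]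
              have ef : walkA pat.length pat (row + p.1 + p.1) (col + p.2 + p.2) srow scol [] (i + 1)
                  = walkA (pat.length + 1) pat (row + p.1 + p.1) (col + p.2 + p.2) srow scol [] (i + 1) :=
                walkA_fuel _ _ pat _ _ srow scol [] (i + 1) (by omega) (by omega)
              rw [hW, ef]
              exact ih (i + 1) (row + p.1 + p.1) (col + p.2 + p.2) srow scol (by omega) (by omega) (by omega) hs
    · have hieq : i = (pat.length : Int) := by omega
      rw [walkA_stop _ pat row col srow scol [] i (by omega)]
      exact hieq

-- the bridge: B's loop on the suffix with stack (srow,scol)::stk equals A's current frame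
-- followed, if that frame closes and frames remain, by the rest of B's loop
theorem bridge (n : Nat) (pat : List Char) (i row col srow scol : Int)
    (stk : List (Int × Int)) (stops : List (Int × Int))
    (h0 : 0 ≤ i) (hn : ((pat.length : Int) - i).toNat < n)
    (hs : (fstat (pat.drop i.toNat) stk.length).isSome = true) :
    walkBgo (pat.drop i.toNat) i row col ((srow, scol) :: stk) stops
      = if fstat (pat.drop i.toNat) 0 = some true ∧ stk ≠ [] then
          walkBgo (pat.drop ((walkA (pat.length + 1) pat row col srow scol [] i).2.toNat))
            (walkA (pat.length + 1) pat row col srow scol [] i).2 srow scol stk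
            (stops ++ (walkA (pat.length + 1) pat row col srow scol [] i).1)
        else (stops ++ (walkA (pat.length + 1) pat row col srow scol [] i).1,
              (walkA (pat.length + 1) pat row col srow scol [] i).2) := by
  induction n generalizing i row col srow scol stk stops with
  | zero => omega
  | succ n ih =>
    by_cases hlt : i < (pat.length : Int)
    · have hn' : i.toNat < pat.length := by omega
      obtain ⟨hget, hdrop⟩ := pv_drop_step pat i h0 hlt hn'
      generalize hch : pat[i.toNat] = ch at hget hdrop
      rw [hdrop] at hs
      by_cases hc1 : ch = ')'
      · subst hc1
        have hf0 : fstat (pat.drop i.toNat) 0 = some true := by rw [hdrop]; simp [fstat]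
        have hW : walkA (pat.length + 1) pat row col srow scol [] i = ([(row, col)], i + 1) := by
          simp [walkA, if_pos hlt, hget]
        rw [hW, hf0]
        cases stk with
        | nil =>
          have hB : walkBgo (pat.drop i.toNat) i row col [(srow, scol)] stops
              = (stops ++ [(row, col)], i + 1) := by
            rw [hdrop]; simp [walkBgo]
          rw [hB]
          simp
        | cons p rest =>
          have hB : walkBgo (pat.drop i.toNat) i row col ((srow, scol) :: p :: rest) stops
              = walkBgo (pat.drop ((i + 1).toNat)) (i + 1) srow scol (p :: rest) (stops ++ [(row, col)]) := by
            rw [hdrop]; simp [walkBgo]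
          rw [hB]
          simp
      · by_cases hc2 : ch = '('
        · subst hc2
          simp [fstat] at hs
          have hB : walkBgo (pat.drop i.toNat) i row col ((srow, scol) :: stk) stops
              = walkBgo (pat.drop ((i + 1).toNat)) (i + 1) row col ((row, col) :: (srow, scol) :: stk) stops := by
            rw [hdrop]; simp [walkBgo]
          rw [hB]
          have hIH1 := ih (i + 1) row col row col ((srow, scol) :: stk) stops (by omega) (by omega)
            (by simpa using hs)
          rw [hIH1]
          set W1 := walkA (pat.length + 1) pat row col row col [] (i + 1) with hW1
          have hiS0 : (fstat (pat.drop ((i + 1).toNat)) 0).isSome = true :=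
            fstat_isSome_anti _ 0 (stk.length + 1) (by omega) hs
          have hW : walkA (pat.length + 1) pat row col srow scol [] i
              = (W1.1 ++ (walkA (pat.length + 1) pat row col srow scol [] W1.2).1,
                 (walkA (pat.length + 1) pat row col srow scol [] W1.2).2) := by
            have hW' : walkA (pat.length + 1) pat row col srow scol [] i
                = walkA pat.length pat row col srow scol
                    ([] ++ (walkA pat.length pat row col row col [] (i + 1)).1)
                    ((walkA pat.length pat row col row col [] (i + 1)).2) := by
              simp [walkA, if_pos hlt, hget]
            have ef : walkA pat.length pat row col row col [] (i + 1) = W1 :=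
              walkA_fuel _ _ pat row col row col [] (i + 1) (by omega) (by omega)
            have hge : i + 1 ≤ W1.2 := walkA_snd_ge (pat.length + 1) pat row col row col [] (i + 1)
            have ec : walkA pat.length pat row col srow scol ([] ++ W1.1) W1.2
                = walkA (pat.length + 1) pat row col srow scol ([] ++ W1.1) W1.2 :=
              walkA_fuel _ _ pat row col srow scol _ W1.2 (by omega) (by omega)
            rw [hW', ef, ec, walkA_stops (pat.length + 1) pat row col srow scol ([] ++ W1.1) W1.2]
            simp
          cases hb : fstat (pat.drop ((i + 1).toNat)) 0 with
          | none => rw [hb] at hiS0; simp at hiS0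
          | some b =>
            cases b with
            | false =>
              have hj1 : W1.2 = (pat.length : Int) :=
                frame_exhausts (((pat.length : Int) - (i + 1)).toNat + 1) pat (i + 1) row col row col
                  (by omega) (by omega) (by omega) hb
              have hf0 : fstat (pat.drop i.toNat) 0 = some false := by
                rw [hdrop]
                simp only [fstat, reduceIte]
                exact fstat_false_mono _ 0 1 (by omega) hb
              rw [hf0, hW]
              rw [walkA_stop (pat.length + 1) pat row col srow scol [] W1.2 (by omega)]
              simp [hj1]
            | true =>
              obtain ⟨hj1, hj1len, hshift1⟩ :=
                frame_closes (((pat.length : Int) - (i + 1)).toNat + 1) pat (i + 1) row col row col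
                  (by omega) (by omega) hb
              rw [← hW1] at hj1 hj1len hshift1
              have hIH2 := ih W1.2 row col srow scol stk (stops ++ W1.1) (by omega) (by omega)
                (by rw [hshift1 stk.length]; exact hs)
              rw [if_pos (by simp : some true = some true ∧ (srow, scol) :: stk ≠ []), hIH2, hW]
              have hf01 : fstat (pat.drop i.toNat) 0 = fstat (pat.drop (W1.2.toNat)) 0 := by
                rw [hdrop, hshift1 0]
                simp [fstat]
              rw [hf01]
              split
              · simp
              · simp
        · by_cases hc3 : ch = '|'
          · subst hc3
            simp [fstat] at hs
            have hf0 : fstat (pat.drop i.toNat) 0 = fstat (pat.drop ((i + 1).toNat)) 0 := by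
              rw [hdrop]; simp [fstat]
            have hB : walkBgo (pat.drop i.toNat) i row col ((srow, scol) :: stk) stops
                = walkBgo (pat.drop ((i + 1).toNat)) (i + 1) srow scol ((srow, scol) :: stk) (stops ++ [(row, col)]) := by
              rw [hdrop]; simp [walkBgo]
            rw [hB]
            have hIH1 := ih (i + 1) srow scol srow scol stk (stops ++ [(row, col)]) (by omega) (by omega)
              (by simpa using hs)
            rw [hIH1]
            have hW : walkA (pat.length + 1) pat row col srow scol [] i
                = ((row, col) :: (walkA (pat.length + 1) pat srow scol srow scol [] (i + 1)).1,
                   (walkA (pat.length + 1) pat srow scol srow scol [] (i + 1)).2) := by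
              have hW' : walkA (pat.length + 1) pat row col srow scol [] i
                  = walkA pat.length pat srow scol srow scol ([] ++ [(row, col)]) (i + 1) := by
                simp [walkA, if_pos hlt, hget]
              have ef : walkA pat.length pat srow scol srow scol ([] ++ [(row, col)]) (i + 1)
                  = walkA (pat.length + 1) pat srow scol srow scol ([] ++ [(row, col)]) (i + 1) :=
                walkA_fuel _ _ pat srow scol srow scol _ (i + 1) (by omega) (by omega)
              rw [hW', ef, walkA_stops (pat.length + 1) pat srow scol srow scol ([] ++ [(row, col)]) (i + 1)]
              simp
            rw [hW, hf0]
            split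
            · simp
            · simp
          · cases hl : pvDirs.lookup ch with
            | none =>
              simp [fstat, if_neg hc1, if_neg hc2, if_neg hc3, hl] at hs
            | some p =>
              have hmk : markA row col ch = some (row + p.1 + p.1, col + p.2 + p.2) := by
                simp [markA, hl]
              have hsb : stepB row col ch = some (row + p.1 + p.1, col + p.2 + p.2) := by
                rw [stepB_eq_markA]; exact hmk
              have hs' : (fstat (pat.drop ((i + 1).toNat)) stk.length).isSome = true := by
                simpa [fstat, if_neg hc1, if_neg hc2, if_neg hc3, hl] using hs
              have hf0 : fstat (pat.drop i.toNat) 0 = fstat (pat.drop ((i + 1).toNat)) 0 := by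
                rw [hdrop]; simp [fstat, if_neg hc1, if_neg hc2, hl]
              have hB : walkBgo (pat.drop i.toNat) i row col ((srow, scol) :: stk) stops
                  = walkBgo (pat.drop ((i + 1).toNat)) (i + 1) (row + p.1 + p.1) (col + p.2 + p.2) ((srow, scol) :: stk) stops := by
                rw [hdrop]; simp [walkBgo, if_neg hc1, if_neg hc2, if_neg hc3, hsb]
              have hW : walkA (pat.length + 1) pat row col srow scol [] i
                  = walkA pat.length pat (row + p.1 + p.1) (col + p.2 + p.2) srow scol [] (i + 1) := by
                simp [walkA, if_pos hlt, hget, if_neg hc1, if_neg hc2, if_neg hc3, hmk]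
              have ef : walkA pat.length pat (row + p.1 + p.1) (col + p.2 + p.2) srow scol [] (i + 1)
                  = walkA (pat.length + 1) pat (row + p.1 + p.1) (col + p.2 + p.2) srow scol [] (i + 1) :=
                walkA_fuel _ _ pat _ _ srow scol [] (i + 1) (by omega) (by omega)
              rw [hB, ih (i + 1) (row + p.1 + p.1) (col + p.2 + p.2) srow scol stk stops (by omega) (by omega) hs',
                  hW, ef, hf0]
    · have hdn : pat.drop i.toNat = [] := List.drop_eq_nil_of_le (by omega)
      have hf0 : fstat (pat.drop i.toNat) 0 = some false := by rw [hdn]; rfl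
      rw [walkA_stop _ pat row col srow scol [] i hlt, hdn]
      simp [walkBgo, fstat]

-- ===== VERDICT (by name: the statement is the Claim_ definition above) =====
theorem walk_group_spec : Claim_equal_walk_group := by
  intro grid row col pattern i _ hpre
  obtain ⟨h0, hs⟩ := hpre
  show walk_group grid row col pattern i = walk_group_alt grid row col pattern i
  unfold walk_group walk_group_alt
  have hb := bridge (((pattern.toList.length : Int) - i).toNat + 1) pattern.toList i row col row col [] []
    h0 (by omega) (by simpa using hs)
  simp only [ne_eq, not_true_eq_false, and_false, if_false] at hb
  rw [hb]
  simp
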